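-- pv_equiv track=rewrite | github.com/penn5/cipherchallenge | solver.py | abstractify_word
-- ===== SOURCE A (Python) =====
-- def abstractify_word(word):
--     abstract_mapping = {}
--     max_id = 0
--     ret = []
--     for char in word:
--         if char not in abstract_mapping.keys():
--             abstract_mapping[char] = max_id
--             max_id += 1
--         ret.append(abstract_mapping[char])
--     return tuple(ret)
-- ===== SOURCE B (Python) =====
-- def abstractify_word(word):
--     # Closed form per position: the id of a character is the number of
--     # distinct characters strictly before its first occurrence.
--     return tuple(len(set(word[:word.index(c)])) for c in word)
-- ===== Notes on version B (the rewrite author's own statement) =====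
-- stated objective: alternative
-- what changed: Dropped the id-assigning mapping entirely: each position's id is computed independently by the closed form len(set(word[:word.index(c)])) (number of distinct characters before the first occurrence), trading A's single O(n) stateful scan for stateless per-character recomputation (O(n^2)).
import Mathlib
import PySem

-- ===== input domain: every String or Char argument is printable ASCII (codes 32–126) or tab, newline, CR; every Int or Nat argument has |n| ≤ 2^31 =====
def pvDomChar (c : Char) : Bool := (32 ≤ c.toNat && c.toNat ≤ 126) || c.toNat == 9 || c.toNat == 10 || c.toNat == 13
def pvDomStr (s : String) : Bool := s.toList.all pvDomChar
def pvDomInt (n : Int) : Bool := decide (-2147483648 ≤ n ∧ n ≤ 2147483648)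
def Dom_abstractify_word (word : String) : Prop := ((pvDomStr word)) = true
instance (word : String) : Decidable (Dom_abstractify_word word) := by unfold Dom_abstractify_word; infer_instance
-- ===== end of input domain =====

-- B drops A's id-assigning mapping: each position's id is the stateless closed
-- form len(set(word[:word.index(c)])); objective: alternative (B is quadratic).


-- ===== PORT A =====
-- loop body of A's single scan, as a named helper; the dict lookup
-- abstract_mapping[char] is always present at that point, so
-- `(·.get? char).getD 0` is exact (Python never raises here)
def stepA (st : PySem.Dict Char Int × Int × List Int) (char : Char) :
    PySem.Dict Char Int × Int × List Int :=
  let st' :=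
    if st.1.contains char then (st.1, st.2.1)
    else (st.1.insert char st.2.1, st.2.1 + 1)
  (st'.1, st'.2, st.2.2 ++ [(st'.1.get? char).getD 0])

def abstractify_word (word : String) : List Int :=
  (word.toList.foldl stepA (PySem.Dict.empty, 0, [])).2.2

-- ===== PORT B =====
-- len(set(word[:word.index(c)])) for c in word; word.index(c) always succeeds
-- (c is drawn from word), so `(index? …).getD 0` is exact
def abstractify_word_alt (word : String) : List Int :=
  word.toList.map (fun c =>
    ((PySem.Set.ofList
        (PySem.List.slice word.toList none
          (some (((PySem.List.index? word.toList c).getD 0 : Nat) : Int)))).length : Int))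

-- ===== PRECONDITION & SPEC =====
def Spec_abstractify_word (word : String) (out : List Int) : Prop := out = abstractify_word_alt word
instance (word : String) (out : List Int) : Decidable (Spec_abstractify_word word out) := by unfold Spec_abstractify_word; infer_instance

-- ===== CLAIM (what is proved, stated in full; the proofs are below) =====
def Claim_equal_abstractify_word : Prop := ∀ (word : String), Dom_abstractify_word word → Spec_abstractify_word word (abstractify_word word)

-- ===== LEMMAS AND PROOFS =====

-- folding Set.add only appends to the seen-list
lemma foldl_add_append (l : List Char) : ∀ (seen : PySem.Set Char),
    ∃ t, l.foldl PySem.Set.add seen = seen ++ t := by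
  induction l with
  | nil => intro seen; exact ⟨[], by simp⟩
  | cons c l ih =>
    intro seen
    simp only [List.foldl_cons]
    by_cases h : seen.contains c = true
    · obtain ⟨t, ht⟩ := ih seen
      have hadd : PySem.Set.add seen c = seen := by unfold PySem.Set.add; rw [if_pos h]
      exact ⟨t, by rw [hadd, ht]⟩
    · obtain ⟨t, ht⟩ := ih (seen ++ [c])
      have hadd : PySem.Set.add seen c = seen ++ [c] := by
        unfold PySem.Set.add; rw [if_neg h]
      exact ⟨[c] ++ t, by rw [hadd, ht]; simp⟩

-- the index of an already-seen char is stable under further Set.add folding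
lemma index?_foldl_add_of_mem (l : List Char) (seen : PySem.Set Char) {c : Char}
    (hc : c ∈ seen) :
    PySem.List.index? (l.foldl PySem.Set.add seen) c = PySem.List.index? seen c := by
  obtain ⟨t, ht⟩ := foldl_add_append l seen
  rw [ht, PySem.List.index?_append_of_mem t hc]

-- the two shapes of one step of A's loop
lemma stepA_mem (m : PySem.Dict Char Int) (mx : Int) (ret : List Int) {c : Char}
    (h : m.contains c = true) :
    stepA (m, mx, ret) c = (m, mx, ret ++ [(m.get? c).getD 0]) := by
  simp [stepA, h]

lemma stepA_new (m : PySem.Dict Char Int) (mx : Int) (ret : List Int) {c : Char}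
    (h : m.contains c = false) :
    stepA (m, mx, ret) c
      = (m.insert c mx, mx + 1, ret ++ [((m.insert c mx).get? c).getD 0]) := by
  simp [stepA, h]

-- A's loop, under the invariant "m is the index table of seen": its output is
-- ret ++ the pattern of l read off the final seen-list
lemma loopA (l : List Char) : ∀ (m : PySem.Dict Char Int) (seen : PySem.Set Char)
    (ret : List Int)
    (hm : ∀ c, m.get? c = (PySem.List.index? seen c).map (fun n : Nat => (n : Int))),
    (l.foldl stepA (m, (seen.length : Int), ret)).2.2
    = ret ++ l.map (fun c =>
        ((PySem.List.index? (l.foldl PySem.Set.add seen) c).map (fun n : Nat => (n : Int))).getD 0) := by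
  induction l with
  | nil => intro m seen ret _hm; simp
  | cons c l ih =>
    intro m seen ret hm
    have hcontains : m.contains c = decide (c ∈ seen) := by
      rw [PySem.Dict.contains_eq_isSome_get?, hm c, Option.isSome_map]
      by_cases h : c ∈ seen
      · rw [(PySem.List.index?_isSome_iff seen c).mpr h, decide_eq_true h]
      · rw [(PySem.List.index?_eq_none_iff seen c).mpr h]
        simp [h]
    by_cases h : c ∈ seen
    · -- already seen: dict and counter unchanged
      have hadd : PySem.Set.add seen c = seen := by
        unfold PySem.Set.add
        rw [if_pos (show seen.contains c = true from List.elem_eq_true_of_mem h)]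
      have hct : m.contains c = true := by rw [hcontains]; simp [h]
      rw [List.foldl_cons, stepA_mem m _ _ hct]
      simp only [List.foldl_cons, List.map_cons, hadd]
      rw [ih m seen _ hm]
      have hidx : PySem.List.index? (l.foldl PySem.Set.add seen) c
          = PySem.List.index? seen c := index?_foldl_add_of_mem l seen h
      rw [hm c, hidx]
      simp
    · -- new char: insert with id seen.length, seen grows by [c]
      have hadd : PySem.Set.add seen c = seen ++ [c] := by
        unfold PySem.Set.add
        have hcf : seen.contains c = false := by
          cases hcc : seen.contains c
          · rfl
          · exact absurd (List.mem_of_elem_eq_true hcc) h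
        rw [hcf]
        simp
      have hm' : ∀ x, (m.insert c (seen.length : Int)).get? x
          = (PySem.List.index? (seen ++ [c]) x).map (fun n : Nat => (n : Int)) := by
        intro x
        by_cases hx : x = c
        · rw [hx, PySem.Dict.get?_insert_self,
            PySem.List.index?_append_singleton_self seen c h]
          simp
        · rw [PySem.Dict.get?_insert_of_ne m _ hx, hm x]
          by_cases hxs : x ∈ seen
          · rw [PySem.List.index?_append_of_mem [c] hxs]
          · have h1 : PySem.List.index? seen x = none :=
              (PySem.List.index?_eq_none_iff seen x).mpr hxs
            have h2 : PySem.List.index? (seen ++ [c]) x = none := by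
              rw [PySem.List.index?_eq_none_iff]
              simp [hxs, hx]
            rw [h1, h2]
      have hlen : ((seen.length : Int) + 1) = (((seen ++ [c]).length : Nat) : Int) := by
        simp
      have hcf2 : m.contains c = false := by rw [hcontains]; simp [h]
      rw [List.foldl_cons, stepA_new m _ _ hcf2]
      simp only [List.foldl_cons, List.map_cons, hadd]
      rw [hlen, ih (m.insert c (seen.length : Int)) (seen ++ [c]) _ hm']
      have hmem : c ∈ seen ++ [c] := by simp
      have hidx : PySem.List.index? (l.foldl PySem.Set.add (seen ++ [c])) c
          = some seen.length := by
        rw [index?_foldl_add_of_mem l (seen ++ [c]) hmem,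
          PySem.List.index?_append_singleton_self seen c h]
      rw [hm' c, hidx, PySem.List.index?_append_singleton_self seen c h]
      simp

-- the crux: for c ∈ l, its first-occurrence id (index in set(l)) equals the
-- number of distinct characters strictly before its first occurrence in l
lemma id_eq_card_before (l : List Char) {c : Char} (hc : c ∈ l) :
    PySem.List.index? (PySem.Set.ofList l) c
      = some (PySem.Set.ofList (l.take ((PySem.List.index? l c).getD 0))).length := by
  obtain ⟨j, hj⟩ : ∃ j, PySem.List.index? l c = some j := by
    cases hidx : PySem.List.index? l c
    · exact absurd hc ((PySem.List.index?_eq_none_iff l c).mp hidx)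
    · exact ⟨_, rfl⟩
  obtain ⟨pre, suf, hsplit, hlen, hpre⟩ := (PySem.List.index?_eq_some_iff l c j).mp hj
  have htake : l.take j = pre := by
    rw [hsplit, ← hlen, List.take_left]
  have hcpre : c ∉ PySem.Set.ofList pre := fun hmem =>
    hpre ((PySem.Set.mem_ofList pre c).mp hmem)
  have hcontf : (PySem.Set.ofList pre).contains c = false := by
    cases hcc : (PySem.Set.ofList pre).contains c
    · rfl
    · exact absurd (List.mem_of_elem_eq_true hcc) hcpre
  -- ofList l = ofList pre ++ [c] ++ t for some t
  have hstep : PySem.Set.ofList l = suf.foldl PySem.Set.add (PySem.Set.ofList pre ++ [c]) := by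
    rw [hsplit]
    show (pre ++ c :: suf).foldl PySem.Set.add (PySem.Set.empty) = _
    rw [List.foldl_append, List.foldl_cons]
    have : PySem.Set.add (PySem.Set.ofList pre) c = PySem.Set.ofList pre ++ [c] := by
      unfold PySem.Set.add; rw [hcontf]; simp
    rw [show pre.foldl PySem.Set.add PySem.Set.empty = PySem.Set.ofList pre from rfl, this]
  have hmemc : c ∈ PySem.Set.ofList pre ++ [c] := by simp
  rw [hstep, index?_foldl_add_of_mem suf _ hmemc,
    PySem.List.index?_append_singleton_self _ c hcpre, hj]
  simp [htake]

-- ===== VERDICT (by name: the statement is the Claim_ definition above) =====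
theorem abstractify_word_spec : Claim_equal_abstractify_word := by
  intro word _
  unfold Spec_abstractify_word abstractify_word abstractify_word_alt
  have hempty : ∀ c, (PySem.Dict.empty : PySem.Dict Char Int).get? c
      = (PySem.List.index? ([] : PySem.Set Char) c).map (fun n : Nat => (n : Int)) := by
    intro c; simp [PySem.Dict.get?_empty, PySem.List.index?]
  have hA := loopA word.toList PySem.Dict.empty [] [] hempty
  simp only [List.length_nil, Nat.cast_zero, List.nil_append] at hA
  rw [hA]
  apply List.map_congr_left
  intro c hc
  have hof : word.toList.foldl PySem.Set.add [] = PySem.Set.ofList word.toList := rfl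
  rw [hof, id_eq_card_before word.toList hc,
    PySem.List.slice_to_natCast]
  simp
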